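-- pv_equiv track=rewrite | github.com/misteryco/PythonOOP | First_Steps_in_OOP_with_Python/L_01_Rhombus_of_Stars.py | rhombus_of_stars
-- ===== SOURCE A (Python) =====
-- def rhombus_of_stars(n):
--     string = ""
--     for i in range(n):
--         stars = 1 + i
--         spaces = n - stars
--         string += f'{" " * spaces + "* " * stars}\n'
--     for i in range(n - 2, -1, -1):
--         stars = 1 + i
--         spaces = n - stars
--         string += f'{" " * spaces + "* " * stars}\n'
--     return string
-- ===== SOURCE B (Python) =====
-- def rhombus_of_stars(n):
--     rows = []
--     for i in range(2 * n - 1):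
--         stars = n - abs(n - 1 - i)
--         rows.append(" " * (n - stars) + "* " * stars + "\n")
--     return "".join(rows)
-- ===== Notes on version B (the rewrite author's own statement) =====
-- stated objective: simpler
-- what changed: Replaces A's two mirrored directional loops with one loop over all 2n-1 rows, computing each row's star count directly as n - abs(n-1-i) and joining the rows.
import Mathlib
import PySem

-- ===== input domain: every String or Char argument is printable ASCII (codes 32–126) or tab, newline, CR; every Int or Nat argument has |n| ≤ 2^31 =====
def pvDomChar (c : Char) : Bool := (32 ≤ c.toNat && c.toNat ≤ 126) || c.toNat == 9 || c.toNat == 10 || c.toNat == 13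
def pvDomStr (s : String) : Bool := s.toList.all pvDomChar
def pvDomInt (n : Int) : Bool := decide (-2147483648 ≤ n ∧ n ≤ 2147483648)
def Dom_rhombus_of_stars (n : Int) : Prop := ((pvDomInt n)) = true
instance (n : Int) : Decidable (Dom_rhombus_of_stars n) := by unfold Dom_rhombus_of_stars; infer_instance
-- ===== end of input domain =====

-- B replaces A's two mirrored directional loops with one loop over all 2n-1 rows
-- (stars = n - |n-1-i|), joining the rows; same return value, no side effects.

-- ===== PORT A =====
-- one appended row: ' ' * spaces + '* ' * stars + '\n' (spaces = n - stars)
def pvRow (n stars : Int) : List Char :=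
  PySem.List.pyRepeat [' '] (n - stars) ++ PySem.List.pyRepeat ['*', ' '] stars ++ ['\n']

def rhombus_of_stars (n : Int) : String :=
  let s1 := (PySem.List.pyRange 0 n 1).foldl (fun acc i => acc ++ pvRow n (1 + i)) []
  let s2 := (PySem.List.pyRange (n - 2) (-1) (-1)).foldl (fun acc i => acc ++ pvRow n (1 + i)) s1
  String.ofList s2

-- ===== PORT B =====
def rhombus_of_stars_alt (n : Int) : String :=
  let rows := (PySem.List.pyRange 0 (2 * n - 1) 1).foldl
    (fun acc i => acc ++ [pvRow n (n - |n - 1 - i|)]) []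
  String.ofList (PySem.Chars.join [] rows)

-- ===== PRECONDITION & SPEC =====
def Spec_rhombus_of_stars (n : Int) (out : String) : Prop := out = rhombus_of_stars_alt n
instance (n : Int) (out : String) : Decidable (Spec_rhombus_of_stars n out) := by unfold Spec_rhombus_of_stars; infer_instance

-- ===== CLAIM (what is proved, stated in full; the proofs are below) =====
def Claim_equal_rhombus_of_stars : Prop := ∀ (n : Int), Dom_rhombus_of_stars n → Spec_rhombus_of_stars n (rhombus_of_stars n)

-- ===== LEMMAS AND PROOFS =====

theorem join_empty_flatten (rows : List (List Char)) : List.intercalate [] rows = rows.flatten := by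
  induction rows with
  | nil => simp [List.intercalate]
  | cons h t ih => cases t <;> simp_all [List.intercalate]

theorem pvRow_congr (n : Int) {s t : Int} (h : s = t) : pvRow n s = pvRow n t := by rw [h]

-- A as a flatMap of rows over its two ranges
theorem portA_eq (n : Int) :
    rhombus_of_stars n = String.ofList
      ((PySem.List.pyRange 0 n 1).flatMap (fun i => pvRow n (1 + i)) ++
       (PySem.List.pyRange (n - 2) (-1) (-1)).flatMap (fun i => pvRow n (1 + i))) := by
  unfold rhombus_of_stars
  dsimp only
  rw [PySem.List.foldl_append_eq_flatMap, PySem.List.foldl_append_eq_flatMap]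
  simp

-- B as a flatMap of rows over the single range
theorem portB_eq (n : Int) :
    rhombus_of_stars_alt n = String.ofList
      ((PySem.List.pyRange 0 (2 * n - 1) 1).flatMap (fun i => pvRow n (n - |n - 1 - i|))) := by
  unfold rhombus_of_stars_alt
  dsimp only
  rw [PySem.List.foldl_append_singleton_eq_map]
  simp [PySem.Chars.join, join_empty_flatten, List.flatMap_def]

theorem rhombus_of_stars_spec_aux (n : Int) :
    rhombus_of_stars n = rhombus_of_stars_alt n := by
  rw [portA_eq, portB_eq]
  by_cases hn : n ≤ 0
  · rw [PySem.List.pyRange_one_eq_nil (by omega),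
        PySem.List.pyRange_one_eq_nil (by omega),
        PySem.List.pyRange_neg_one_eq_nil (by omega)]
    simp
  · -- split B's range at n
    rw [PySem.List.pyRange_one_append 0 n (2 * n - 1) (by omega) (by omega),
        List.flatMap_append]
    congr 1
    congr 1
    · -- first half: 0 ≤ i < n ⇒ n - |n-1-i| = 1 + i
      apply List.flatMap_congr
      intro i hi
      rw [PySem.List.mem_pyRange_one] at hi
      have habs : |n - 1 - i| = n - 1 - i := abs_of_nonneg (by omega)
      exact pvRow_congr n (by omega)
    · -- second half vs A's countdown loop: both are rows with stars n-1-k, k = 0..n-2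
      rw [PySem.List.pyRange_one n (2 * n - 1),
          PySem.List.pyRange_neg_one (n - 2) (-1)]
      have hlen : (2 * n - 1 - n).toNat = (n - 2 - (-1)).toNat := by omega
      rw [hlen, List.flatMap_map, List.flatMap_map]
      apply List.flatMap_congr
      intro k hk
      rw [List.mem_range] at hk
      have habs : |n - 1 - (n + (k : Int))| = 1 + k := by
        rw [abs_of_nonpos (by omega)]; ring
      exact pvRow_congr n (by omega)

-- ===== VERDICT (by name: the statement is the Claim_ definition above) =====
theorem rhombus_of_stars_spec : Claim_equal_rhombus_of_stars := by
  intro n _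
  show rhombus_of_stars n = rhombus_of_stars_alt n
  exact rhombus_of_stars_spec_aux n
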